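-- pv_equiv track=rewrite | github.com/aneesqumar/ANNOTATION_HELP_SCRIPTS | src/multicheck.py | _filter_sequences
-- ===== SOURCE A (Python) =====
-- def _filter_sequences(sequences):
--     filt_sequences = []
--     for i, transition in enumerate(sequences):
--         if i + 1 < len(sequences):
--             if not transition[2] == sequences[i + 1][2]:
--                 filt_sequences.append((transition[0], transition[1]))
--         else:
--             filt_sequences.append((transition[0], transition[1]))
--     return filt_sequences
-- ===== SOURCE B (Python) =====
-- def _filter_sequences(sequences):
--     # Group the input into maximal runs of consecutive elements sharing the
--     # same field-2 value, then keep (a, b) of the last element of each run.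
--     # Correct because an element survives in A exactly when it closes its run.
--     runs = []
--     for t in sequences:
--         if runs and runs[-1][-1][2] == t[2]:
--             runs[-1].append(t)
--         else:
--             runs.append([t])
--     return [(r[-1][0], r[-1][1]) for r in runs]
-- ===== Notes on version B (the rewrite author's own statement) =====
-- stated objective: alternative
-- what changed: Replaces A's index/length lookahead single loop by a grouping decomposition: a first pass partitions the list into maximal runs of equal field-2 values (an explicit list-of-runs data structure), a second pass maps each run to (last[0], last[1]).
import Mathlib
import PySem

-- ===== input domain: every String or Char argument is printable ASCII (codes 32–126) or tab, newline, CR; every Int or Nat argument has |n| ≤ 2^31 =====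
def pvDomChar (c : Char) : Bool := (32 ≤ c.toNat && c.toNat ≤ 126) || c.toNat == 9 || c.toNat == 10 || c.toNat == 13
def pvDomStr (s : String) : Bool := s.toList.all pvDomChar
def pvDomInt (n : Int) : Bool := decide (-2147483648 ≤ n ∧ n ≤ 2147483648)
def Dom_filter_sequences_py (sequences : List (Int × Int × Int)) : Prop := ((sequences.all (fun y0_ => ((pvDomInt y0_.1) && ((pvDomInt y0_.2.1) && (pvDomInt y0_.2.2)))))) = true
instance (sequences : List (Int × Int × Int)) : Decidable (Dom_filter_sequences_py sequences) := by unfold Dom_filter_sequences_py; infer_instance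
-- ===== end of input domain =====

-- B replaces A's index/length lookahead loop by a grouping decomposition: first
-- partition into maximal runs of equal field-2 values, then map each run to its
-- last element's (a, b) (objective: alternative).


-- ===== PORT A =====
def filter_sequences_py (sequences : List (Int × Int × Int)) : List (Int × Int) :=
  (PySem.List.enumerate sequences).foldl
    (fun filt_sequences p =>
      let i := p.1
      let transition := p.2
      if i + 1 < (sequences.length : Int) then
        match PySem.List.pyGet? sequences (i + 1) with
        | some nxt =>
          if ¬ (transition.2.2 = nxt.2.2) then
            filt_sequences ++ [(transition.1, transition.2.1)]
          else filt_sequences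
        | none => filt_sequences   -- unreachable: i + 1 is in range
      else filt_sequences ++ [(transition.1, transition.2.1)])
    []

-- ===== PORT B =====
/-- Loop body of B's first pass: append `t` to the last run if its field 2
matches that run's last element, else open a new run. -/
def pvBodyB (runs : List (List (Int × Int × Int))) (t : Int × Int × Int) :
    List (List (Int × Int × Int)) :=
  match runs.getLast? with
  | some r =>
    match r.getLast? with
    | some last =>
        if last.2.2 = t.2.2 then runs.dropLast ++ [r ++ [t]] else runs ++ [[t]]
    | none => runs ++ [[t]]   -- unreachable: every run is nonempty
  | none => runs ++ [[t]]

/-- Output pair of a run: its last element's first two fields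
(`(0, 0)` is unreachable: every run is nonempty). -/
def pvEmitRun (r : List (Int × Int × Int)) : Int × Int :=
  match r.getLast? with
  | some last => (last.1, last.2.1)
  | none => (0, 0)

def filter_sequences_py_alt (sequences : List (Int × Int × Int)) : List (Int × Int) :=
  let runs := sequences.foldl pvBodyB []
  runs.map pvEmitRun

-- ===== PRECONDITION & SPEC =====
def Spec_filter_sequences_py (sequences : List (Int × Int × Int)) (out : List (Int × Int)) : Prop := out = filter_sequences_py_alt sequences
instance (sequences : List (Int × Int × Int)) (out : List (Int × Int)) : Decidable (Spec_filter_sequences_py sequences out) := by unfold Spec_filter_sequences_py; infer_instance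

-- ===== CLAIM (what is proved, stated in full; the proofs are below) =====
def Claim_equal_filter_sequences_py : Prop := ∀ (sequences : List (Int × Int × Int)), Dom_filter_sequences_py sequences → Spec_filter_sequences_py sequences (filter_sequences_py sequences)

-- ===== LEMMAS AND PROOFS =====

/-- `pvEmit x nxt`: the pair contributed by element `x` whose successor (if any) is `nxt`. -/
def pvEmit (x : Int × Int × Int) (nxt : Option (Int × Int × Int)) : List (Int × Int) :=
  match nxt with
  | none => [(x.1, x.2.1)]
  | some y => if x.2.2 ≠ y.2.2 then [(x.1, x.2.1)] else []

/-- Reference function: each element emits against its in-list successor, `nxt` after the end. -/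
def pvFn : List (Int × Int × Int) → Option (Int × Int × Int) → List (Int × Int)
  | [], _ => []
  | x :: t, nxt =>
      pvEmit x (match t with | [] => nxt | y :: _ => some y) ++ pvFn t nxt

lemma pvFn_append_singleton (ys : List (Int × Int × Int)) (t : Int × Int × Int)
    (nxt : Option (Int × Int × Int)) :
    pvFn (ys ++ [t]) nxt = pvFn ys (some t) ++ pvEmit t nxt := by
  induction ys with
  | nil => simp [pvFn]
  | cons x zs ih =>
      cases zs with
      | nil => simp [pvFn]
      | cons y ws =>
          simp only [List.cons_append, pvFn] at ih ⊢
          rw [ih]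
          simp [List.append_assoc]

lemma foldB (ys : List (Int × Int × Int)) (L : Int × Int × Int) :
    ∃ R r, (ys ++ [L]).foldl pvBodyB [] = R ++ [r] ∧ r.getLast? = some L ∧
      R.map pvEmitRun = pvFn ys (some L) := by
  induction ys using List.reverseRecOn generalizing L with
  | nil =>
      exact ⟨[], [L], by simp [pvBodyB], by simp, by simp [pvFn]⟩
  | append_singleton zs M ih =>
      obtain ⟨R, r, hfold, hlast, hmap⟩ := ih M
      rw [List.foldl_append, hfold]
      simp only [List.foldl_cons, List.foldl_nil]
      by_cases h : M.2.2 = L.2.2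
      · refine ⟨R, r ++ [L], ?_, by simp, ?_⟩
        · simp [pvBodyB, hlast, h]
        · rw [pvFn_append_singleton, hmap, pvEmit]
          simp [h]
      · refine ⟨R ++ [r], [L], ?_, by simp, ?_⟩
        · simp [pvBodyB, hlast, h]
        · rw [pvFn_append_singleton, List.map_append, hmap, pvEmit]
          simp [h, pvEmitRun, hlast]

lemma B_eq_Fn (xs : List (Int × Int × Int)) :
    filter_sequences_py_alt xs = pvFn xs none := by
  induction xs using List.reverseRecOn with
  | nil => rfl
  | append_singleton ys L _ =>
      obtain ⟨R, r, hfold, hlast, hmap⟩ := foldB ys L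
      unfold filter_sequences_py_alt
      rw [hfold, pvFn_append_singleton]
      simp only [List.map_append, List.map_cons, List.map_nil]
      rw [hmap, pvEmit]
      simp [pvEmitRun, hlast]

lemma A_fold (ys : List (Int × Int × Int)) :
    ∀ (rest : List (Int × Int × Int)) (s : Nat) (acc : List (Int × Int)),
    ys.drop s = rest →
    ((PySem.List.enumerate rest (s : Int)).foldl
      (fun filt_sequences p =>
        let i := p.1
        let transition := p.2
        if i + 1 < (ys.length : Int) then
          match PySem.List.pyGet? ys (i + 1) with
          | some nxt =>
            if ¬ (transition.2.2 = nxt.2.2) then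
              filt_sequences ++ [(transition.1, transition.2.1)]
            else filt_sequences
          | none => filt_sequences
        else filt_sequences ++ [(transition.1, transition.2.1)])
      acc) = acc ++ pvFn rest none := by
  intro rest
  induction rest with
  | nil => intro s acc _; simp [pvFn, PySem.List.enumerate]
  | cons x t ih =>
      intro s acc hdrop
      have hs : s ≤ ys.length := by
        by_contra h
        rw [List.drop_eq_nil_of_le (by omega)] at hdrop
        exact (List.cons_ne_nil x t) hdrop.symm
      have hlen : ys.length = s + 1 + t.length := by
        have h1 := congrArg List.length hdrop
        rw [List.length_drop] at h1
        simp at h1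
        omega
      have hdrop' : ys.drop (s + 1) = t := by
        have h2 : ys.drop (s + 1) = (ys.drop s).drop 1 := by rw [List.drop_drop]
        rw [h2, hdrop]; rfl
      have hcast : PySem.List.enumerate t ((s : Int) + 1)
          = PySem.List.enumerate t ((s + 1 : Nat) : Int) := by push_cast; ring_nf
      rw [PySem.List.enumerate_cons, List.foldl_cons, hcast, ih (s + 1) _ hdrop']
      cases t with
      | nil =>
          have hc : ¬ ((s : Int) + 1 < (ys.length : Int)) := by
            simp at hlen; omega
          simp [hc, pvFn, pvEmit]
      | cons y t' =>
          have hc : ((s : Int) + 1 < (ys.length : Int)) := by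
            simp [hlen]
          have hget : PySem.List.pyGet? ys ((s : Int) + 1) = some y := by
            have h3 := congrArg List.head? hdrop'
            rw [List.head?_drop] at h3
            have h4 : (s : Int) + 1 = ((s + 1 : Nat) : Int) := by push_cast; ring
            rw [h4, PySem.List.pyGet?_natCast, h3]; rfl
          simp only [hc, if_true, hget, pvFn, pvEmit]
          split_ifs with h <;> simp_all [List.append_assoc]

-- ===== VERDICT (by name: the statement is the Claim_ definition above) =====
theorem filter_sequences_py_spec : Claim_equal_filter_sequences_py := by
  intro xs _
  unfold Spec_filter_sequences_py filter_sequences_py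
  rw [B_eq_Fn]
  have h := A_fold xs xs 0 [] (by simp)
  simpa using h
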